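-- pv_equiv track=rewrite | github.com/Den-Prahms-ihr-Ivo/DLMCSPCSP01 | src/graph_utils.py | _reduce_possible_combinations
-- ===== SOURCE A (Python) =====
-- import operator
-- from typing import Dict, TypedDict, Optional, List, Tuple, Callable
--
-- def _find_subset_indices(arr, target):
--     """
--     Recursive Search if a target number can be expressed as the sum of a subset of an array
--     """
--
--     # Depth First Search
--     def dfs(i, remaining):
--         if remaining == 0:
--             return []
--
--         if i >= len(arr) or remaining < 0:
--             return None
--
--         # Include arr[i]
--         with_curr = dfs(
--             i + 1, remaining - abs(arr[i])
--         )  # Absolute, for this specific case.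
--         if with_curr is not None:
--             result = [i] + with_curr
--             return result
--
--         # Exclude arr[i]
--         without_curr = dfs(i + 1, remaining)
--         return without_curr
--
--     tmp = dfs(0, abs(target))
--     return tmp if tmp else []
--
-- def _reduce_possible_combinations(
--     balances, reverse=True
-- ) -> Optional[Tuple[int, List[int]]]:
--     """
--     It is assumed, that the balance list is already sorted from high to low.
--     i.e. 9,8,2,-4,-5,10
--
--     Returns ( index of number that has a subset)
--     None if not possible
--     """
--     # Find possible commbinations to settle debts more efficiently
--     comp = operator.lt if reverse else operator.gt
--
--     splitting_index = next((i for i, b in enumerate(balances) if comp(b, 0)), None)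
--
--     if not splitting_index:
--         return None
--
--     right_balances = balances[splitting_index:]
--
--     # Now we try to find a way to express a balance on the left as a sum of balances on the right (i.r)
--     for l, left in enumerate(balances[:splitting_index]):
--         subset = _find_subset_indices(arr=right_balances, target=left)
--         if len(subset) > 0:
--             return (l, [s + splitting_index for s in subset])
--
--     return None
-- ===== SOURCE B (Python) =====
-- def _reduce_possible_combinations(balances, reverse=True):
--     split = None
--     for i, b in enumerate(balances):
--         if (b < 0) if reverse else (b > 0):
--             split = i
--             break
--     if split is None:
--         return None
--     right = [abs(x) for x in balances[split:]]
--     n = len(right)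
--     memo = {}
--
--     def can(i, rem):
--         if rem == 0:
--             return True
--         if i >= n or rem < 0:
--             return False
--         key = (i, rem)
--         if key not in memo:
--             memo[key] = can(i + 1, rem - right[i]) or can(i + 1, rem)
--         return memo[key]
--
--     for l in range(split):
--         t = abs(balances[l])
--         if t != 0 and can(0, t):
--             # greedy reconstruction: include index i exactly when the
--             # include-branch is feasible, mirroring the first-found subset
--             res = []
--             i, rem = 0, t
--             while rem != 0:
--                 if can(i + 1, rem - right[i]):
--                     res.append(i + split)
--                     rem -= right[i]
--                 i += 1
--             return (l, res)
--     return None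
-- ===== Notes on version B (the rewrite author's own statement) =====
-- stated objective: alternative
-- what changed: Replaced the exponential include/exclude subset-sum DFS by a memoized feasibility predicate on (index, remaining) plus a greedy reconstruction that rebuilds the same first-found subset, with absolute values precomputed once; this trades A's worst-case exponential search for a pseudo-polynomial cache at some constant overhead on easy inputs.
import Mathlib
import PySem

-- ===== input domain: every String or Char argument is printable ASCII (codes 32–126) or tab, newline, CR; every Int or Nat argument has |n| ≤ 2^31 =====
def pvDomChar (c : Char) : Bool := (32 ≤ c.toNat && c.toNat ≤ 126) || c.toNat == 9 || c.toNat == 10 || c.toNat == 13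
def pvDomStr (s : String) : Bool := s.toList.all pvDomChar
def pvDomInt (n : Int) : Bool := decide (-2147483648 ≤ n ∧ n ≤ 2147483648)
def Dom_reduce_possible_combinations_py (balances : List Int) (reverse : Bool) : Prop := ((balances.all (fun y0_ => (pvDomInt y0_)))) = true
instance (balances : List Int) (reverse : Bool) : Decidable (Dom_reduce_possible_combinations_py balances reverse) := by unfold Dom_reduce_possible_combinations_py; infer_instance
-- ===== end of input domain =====

-- B replaces A's include/exclude subset-sum DFS by a memoized feasibility test plus a greedy
-- reconstruction of the same first-found subset (objective: alternative algorithm).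

-- ===== PORT A =====

-- dfs of _find_subset_indices: include-first depth-first search
def pvDfsA (arr : List Int) (i : Nat) (rem : Int) : Option (List Int) :=
  if rem = 0 then some []
  else if h : arr.length ≤ i ∨ rem < 0 then none
  else
    match pvDfsA arr (i + 1) (rem - |arr[i]?.getD 0|) with
    | some w => some ((i : Int) :: w)
    | none => pvDfsA arr (i + 1) rem
termination_by arr.length - i
decreasing_by all_goals (push_neg at h; omega)

def pvFindSubsetIndices (arr : List Int) (target : Int) : List Int :=
  match pvDfsA arr 0 |target| with
  | some w => if w = [] then [] else w   -- `tmp if tmp else []`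
  | none => []

-- next((i for i, b in enumerate(balances) if comp(b, 0)), None)
def pvFindSplitA (comp : Int → Int → Bool) : List Int → Nat → Option Nat
  | [], _ => none
  | b :: rest, i => if comp b 0 then some i else pvFindSplitA comp rest (i + 1)

-- for l, left in enumerate(balances[:splitting_index]): ...
def pvLoopA (right : List Int) (s : Nat) : Nat → List Int → Option (Int × List Int)
  | _, [] => none
  | l, left :: rest =>
    let subset := pvFindSubsetIndices right left
    if 0 < subset.length then some ((l : Int), subset.map (· + (s : Int)))
    else pvLoopA right s (l + 1) rest

def reduce_possible_combinations_py (balances : List Int) (reverse : Bool) : Option (Int × List Int) :=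
  let comp : Int → Int → Bool := if reverse then (fun a b => a < b) else (fun a b => a > b)
  match pvFindSplitA comp balances 0 with
  | none => none                    -- `if not splitting_index` (None ...
  | some s =>
    if s = 0 then none              --  ... or 0)
    else pvLoopA (balances.drop s) s 0 (balances.take s)

-- ===== PORT B =====

-- Source B's `can` (in Python it carries a memo dict; the memo is a pure cache, the
-- computed value is exactly this recursion)
def pvCanB (arr : List Int) (i : Nat) (rem : Int) : Bool :=
  if rem = 0 then true
  else if h : arr.length ≤ i ∨ rem < 0 then false
  else pvCanB arr (i + 1) (rem - arr[i]?.getD 0) || pvCanB arr (i + 1) rem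
termination_by arr.length - i
decreasing_by all_goals (push_neg at h; omega)

-- Source B's reconstruction while-loop (the `i ≥ len` branch is a totality guard; the
-- Python loop only runs while feasibility guarantees rem reaches 0 before i runs out)
def pvRebuildB (arr : List Int) (s : Nat) (i : Nat) (rem : Int) : List Int :=
  if rem = 0 then []
  else if h : arr.length ≤ i then []
  else if pvCanB arr (i + 1) (rem - arr[i]?.getD 0) then
    ((i + s : Nat) : Int) :: pvRebuildB arr s (i + 1) (rem - arr[i]?.getD 0)
  else pvRebuildB arr s (i + 1) rem
termination_by arr.length - i

-- for l in range(split): ...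
def pvLoopB (balances rightAbs : List Int) (s : Nat) (l : Nat) : Option (Int × List Int) :=
  if h : l < s then
    let t := |balances[l]?.getD 0|
    if t ≠ 0 ∧ pvCanB rightAbs 0 t then some ((l : Int), pvRebuildB rightAbs s 0 t)
    else pvLoopB balances rightAbs s (l + 1)
  else none
termination_by s - l

-- Source B's split-finding for loop with break
def pvFindSplitB (reverse : Bool) : List Int → Nat → Option Nat
  | [], _ => none
  | b :: rest, i =>
    if (if reverse then b < 0 else b > 0) then some i else pvFindSplitB reverse rest (i + 1)

def reduce_possible_combinations_py_alt (balances : List Int) (reverse : Bool) : Option (Int × List Int) :=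
  match pvFindSplitB reverse balances 0 with
  | none => none
  | some s =>
    let rightAbs := (balances.drop s).map (fun x => |x|)
    pvLoopB balances rightAbs s 0

-- ===== PRECONDITION & SPEC =====
def Spec_reduce_possible_combinations_py (balances : List Int) (reverse : Bool) (out : Option (Int × List Int)) : Prop := out = reduce_possible_combinations_py_alt balances reverse
instance (balances : List Int) (reverse : Bool) (out : Option (Int × List Int)) : Decidable (Spec_reduce_possible_combinations_py balances reverse out) := by unfold Spec_reduce_possible_combinations_py; infer_instance

-- ===== CLAIM (what is proved, stated in full; the proofs are below) =====
def Claim_equal_reduce_possible_combinations_py : Prop := ∀ (balances : List Int) (reverse : Bool), Dom_reduce_possible_combinations_py balances reverse → Spec_reduce_possible_combinations_py balances reverse (reduce_possible_combinations_py balances reverse)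

-- ===== LEMMAS AND PROOFS =====

-- relative-index version of the reconstruction, used only in the proofs
def pvRel (arr : List Int) (i : Nat) (rem : Int) : List Int :=
  if rem = 0 then []
  else if h : arr.length ≤ i then []
  else if pvCanB arr (i + 1) (rem - arr[i]?.getD 0) then
    (i : Int) :: pvRel arr (i + 1) (rem - arr[i]?.getD 0)
  else pvRel arr (i + 1) rem
termination_by arr.length - i

theorem pvFindSplit_eq (reverse : Bool) (l : List Int) (i : Nat) :
    pvFindSplitA (if reverse then (fun a b => a < b) else (fun a b => a > b)) l i
      = pvFindSplitB reverse l i := by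
  induction l generalizing i with
  | nil => cases reverse <;> rfl
  | cons b rest ih =>
    cases reverse <;> simp [pvFindSplitA, pvFindSplitB] <;> split <;> simp_all

theorem pvFindSplitB_lt (reverse : Bool) (l : List Int) (i s : Nat)
    (h : pvFindSplitB reverse l i = some s) : i ≤ s ∧ s - i < l.length := by
  induction l generalizing i with
  | nil => cases reverse <;> simp [pvFindSplitB] at h
  | cons b rest ih =>
    simp only [pvFindSplitB] at h
    split at h <;>
      first
      | (injection h with he; simp; omega)
      | (have := ih (i + 1) h; simp; omega)
      | (split at h <;>
          first
          | (injection h with he; simp; omega)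
          | (have := ih (i + 1) h; simp; omega))

theorem pvDfs_eq_can (arr : List Int) (k i : Nat) (rem : Int) (hk : arr.length - i ≤ k) :
    pvDfsA arr i rem
      = (if pvCanB (arr.map (fun x => |x|)) i rem
          then some (pvRel (arr.map (fun x => |x|)) i rem) else none) := by
  induction k generalizing i rem with
  | zero =>
    rw [pvDfsA, pvCanB, pvRel]
    by_cases h0 : rem = 0
    · simp [h0]
    · have hlen : arr.length ≤ i := by omega
      simp [h0, hlen]
  | succ k ih =>
    rw [pvDfsA, pvCanB, pvRel]
    by_cases h0 : rem = 0
    · simp [h0]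
    · by_cases hb : arr.length ≤ i ∨ rem < 0
      · have hb' : (arr.map (fun x => |x|)).length ≤ i ∨ rem < 0 := by
          simpa using hb
        simp [h0, hb, hb']
      · have hb' : ¬ ((arr.map (fun x => |x|)).length ≤ i ∨ rem < 0) := by
          simpa using hb
        have hi : i < arr.length := by push_neg at hb; omega
        have hget : (arr.map (fun x => |x|))[i]?.getD 0 = |arr[i]?.getD 0| := by
          simp [List.getElem?_map, List.getElem?_eq_getElem hi]
        have hlen : ¬ (arr.map (fun x => |x|)).length ≤ i := by simpa using hi.not_ge
        rw [ih (i + 1) (rem - |arr[i]?.getD 0|) (by omega),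
            ih (i + 1) rem (by omega)]
        simp only [h0, hb, hb', hlen, hget, if_false, if_neg, dite_false]
        have hr0 : (0 : Int) ≤ rem := by push_neg at hb; omega
        by_cases hc1 : pvCanB (arr.map fun x => |x|) (i + 1) (rem - |arr[i]?.getD 0|)
        · simp [hc1, hr0]
        · simp [hc1, hr0]

theorem pvRebuildB_eq_map (arr : List Int) (s : Nat) (k i : Nat) (rem : Int)
    (hk : arr.length - i ≤ k) :
    pvRebuildB arr s i rem = (pvRel arr i rem).map (· + (s : Int)) := by
  induction k generalizing i rem with
  | zero =>
    rw [pvRebuildB, pvRel]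
    by_cases h0 : rem = 0
    · simp [h0]
    · have hlen : arr.length ≤ i := by omega
      rw [if_neg h0, if_neg h0, dif_pos hlen, dif_pos hlen]
      rfl
  | succ k ih =>
    rw [pvRebuildB, pvRel]
    by_cases h0 : rem = 0
    · simp [h0]
    · rw [if_neg h0, if_neg h0]
      by_cases hlen : arr.length ≤ i
      · rw [dif_pos hlen, dif_pos hlen]
        rfl
      · rw [dif_neg hlen, dif_neg hlen]
        by_cases hc : pvCanB arr (i + 1) (rem - arr[i]?.getD 0) = true
        · rw [if_pos hc, if_pos hc, List.map_cons,
              ih (i + 1) (rem - arr[i]?.getD 0) (by omega), List.cons_eq_cons]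
          exact ⟨by push_cast; ring, rfl⟩
        · rw [if_neg hc, if_neg hc]
          exact ih (i + 1) rem (by omega)

theorem pvRel_ne_nil (arr : List Int) (k i : Nat) (rem : Int) (hk : arr.length - i ≤ k)
    (hc : pvCanB arr i rem = true) (h0 : rem ≠ 0) : pvRel arr i rem ≠ [] := by
  induction k generalizing i rem with
  | zero =>
    rw [pvCanB, if_neg h0, dif_pos (Or.inl (by omega : arr.length ≤ i))] at hc
    exact absurd hc (by simp)
  | succ k ih =>
    rw [pvCanB, if_neg h0] at hc
    rw [pvRel, if_neg h0]
    by_cases hb : arr.length ≤ i ∨ rem < 0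
    · rw [dif_pos hb] at hc
      exact absurd hc (by simp)
    · have hlen : ¬ arr.length ≤ i := fun h => hb (Or.inl h)
      rw [dif_neg hb] at hc
      rw [dif_neg hlen]
      by_cases hc1 : pvCanB arr (i + 1) (rem - arr[i]?.getD 0) = true
      · rw [if_pos hc1]; simp
      · rw [if_neg hc1]
        rw [Bool.or_eq_true] at hc
        have hc2 : pvCanB arr (i + 1) rem = true := by
          rcases hc with h | h
          · exact absurd h hc1
          · exact h
        exact ih (i + 1) rem (by omega) hc2 h0

theorem pvLoop_eq (balances : List Int) (s : Nat) (hs : s ≤ balances.length) :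
    ∀ l, l ≤ s →
      pvLoopA (balances.drop s) s l ((balances.take s).drop l)
        = pvLoopB balances ((balances.drop s).map (fun x => |x|)) s l := by
  intro l hl
  induction hn : s - l generalizing l with
  | zero =>
    have : l = s := by omega
    subst this
    rw [pvLoopB]
    simp [pvLoopA, List.drop_eq_nil_of_le, List.length_take, min_le_left]
  | succ n ih =>
    have hls : l < s := by omega
    have hlb : l < balances.length := by omega
    have hdrop : (balances.take s).drop l = balances[l] :: (balances.take s).drop (l + 1) := by
      rw [List.drop_eq_getElem_cons (by simp; omega)]
      congr 1
      simp [List.getElem_take]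
    rw [hdrop, pvLoopB]
    have hget : |balances[l]?.getD 0| = |balances[l]| := by
      simp [List.getElem?_eq_getElem hlb]
    simp only [pvLoopA, hls, dite_true, hget]
    have hrec := ih (l + 1) (by omega) (by omega)
    rw [pvFindSubsetIndices,
        pvDfs_eq_can (balances.drop s) (balances.drop s).length 0 |balances[l]| (by omega)]
    by_cases h0 : |balances[l]| = 0
    · have hcan0 : pvCanB ((balances.map (fun x => |x|)).drop s) 0 (0 : Int) = true := by
        rw [pvCanB]
        simp
      have hrel0 : pvRel ((balances.map (fun x => |x|)).drop s) 0 (0 : Int) = [] := by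
        rw [pvRel]
        simp
      simp [hcan0, hrel0, h0]
      simpa using hrec
    · by_cases hc : pvCanB ((balances.map (fun x => |x|)).drop s) 0 |balances[l]| = true
      · have hne := pvRel_ne_nil ((balances.map (fun x => |x|)).drop s)
          ((balances.map (fun x => |x|)).drop s).length 0 |balances[l]| (by omega) hc h0
        have hmap := pvRebuildB_eq_map ((balances.map (fun x => |x|)).drop s) s
          ((balances.map (fun x => |x|)).drop s).length 0 |balances[l]| (by omega)
        have hpos : 0 < (pvRel ((balances.map (fun x => |x|)).drop s) 0 |balances[l]|).length := by
          cases hr : pvRel ((balances.map (fun x => |x|)).drop s) 0 |balances[l]| with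
          | nil => exact absurd hr hne
          | cons x xs => simp
        simp [hc, hne, hpos, h0, hmap]
      · simp [hc, h0]
        simpa using hrec

-- ===== VERDICT (by name: the statement is the Claim_ definition above) =====
theorem reduce_possible_combinations_py_spec : Claim_equal_reduce_possible_combinations_py := by
  intro balances reverse _
  unfold Spec_reduce_possible_combinations_py
  simp only [reduce_possible_combinations_py, reduce_possible_combinations_py_alt]
  rw [pvFindSplit_eq]
  cases hsp : pvFindSplitB reverse balances 0 with
  | none => rfl
  | some s =>
    simp only []
    by_cases hs0 : s = 0
    · subst hs0
      rw [pvLoopB]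
      simp
    · have hb := pvFindSplitB_lt reverse balances 0 s hsp
      have hsl : s ≤ balances.length := by omega
      have := pvLoop_eq balances s hsl 0 (by omega)
      simp only [List.drop_zero] at this
      simp [hs0, this]
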